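-- pv_equiv track=rewrite | github.com/jinliangXX/LeetCode | Algorithms/188. Best Time to Buy and Sell Stock IV/solution.py | get_run
-- ===== SOURCE A (Python) =====
-- def get_run(prices):
--     result = 0
--     for i, price in enumerate(prices):
--         if i < 1:
--             continue
--         if price > prices[i - 1]:
--             result += price - prices[i - 1]
--     return result
-- ===== SOURCE B (Python) =====
-- def get_run(prices):
--     # Valley-peak greedy: accumulate (peak - valley) per maximal non-decreasing run.
--     if not prices:
--         return 0
--     total = 0
--     valley = prev = prices[0]
--     for price in prices[1:]:
--         if price < prev:
--             total += prev - valley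
--             valley = price
--         prev = price
--     return total + (prev - valley)
-- ===== Notes on version B (the rewrite author's own statement) =====
-- stated objective: alternative
-- what changed: Replaces the indexed per-pair positive-difference sum (enumerate + prices[i-1] lookups) with a valley-peak greedy that tracks the current run's valley and previous price and flushes (prev - valley) at each descent and at the end.
import Mathlib
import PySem

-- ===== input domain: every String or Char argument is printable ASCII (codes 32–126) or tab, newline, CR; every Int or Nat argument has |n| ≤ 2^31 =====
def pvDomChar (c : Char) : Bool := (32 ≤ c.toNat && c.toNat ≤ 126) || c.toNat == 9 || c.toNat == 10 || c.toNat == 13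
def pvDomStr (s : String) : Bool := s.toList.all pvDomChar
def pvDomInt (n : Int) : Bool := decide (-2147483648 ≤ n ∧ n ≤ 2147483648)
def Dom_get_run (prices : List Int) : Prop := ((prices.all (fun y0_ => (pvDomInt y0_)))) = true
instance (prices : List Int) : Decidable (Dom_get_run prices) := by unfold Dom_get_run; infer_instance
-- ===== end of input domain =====

-- B replaces the per-index positive-difference sum with a valley-peak run greedy (alternative decomposition, same cost).

-- ===== PORT A =====
def get_run (prices : List Int) : Int :=
  (PySem.List.enumerate prices).foldl (fun (result : Int) (ip : Int × Int) =>
    if ip.1 < 1 then result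
    else match PySem.List.pyGet? prices (ip.1 - 1) with
      | some p => if ip.2 > p then result + (ip.2 - p) else result
      | none => result) 0

-- ===== PORT B =====
-- loop over the remaining prices carrying (total, valley, prev)
def runLoop : List Int → Int → Int → Int → Int
  | [], total, valley, prev => total + (prev - valley)
  | price :: rest, total, valley, prev =>
      if price < prev then runLoop rest (total + (prev - valley)) price price
      else runLoop rest total valley price

def get_run_alt (prices : List Int) : Int :=
  match prices with
  | [] => 0
  | p :: rest => runLoop rest 0 p p

-- ===== PRECONDITION & SPEC =====
def Spec_get_run (prices : List Int) (out : Int) : Prop := out = get_run_alt prices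
instance (prices : List Int) (out : Int) : Decidable (Spec_get_run prices out) := by
  unfold Spec_get_run; infer_instance

-- ===== CLAIM =====
def Claim_equal_get_run : Prop := ∀ (prices : List Int), Dom_get_run prices → Spec_get_run prices (get_run prices)

-- ===== LEMMAS AND PROOFS =====
-- common characterisation: sum of positive adjacent differences, given the previous price
def diffSum : Int → List Int → Int
  | _, [] => 0
  | prev, x :: xs => (if x > prev then x - prev else 0) + diffSum x xs

lemma runLoop_eq (rest : List Int) : ∀ (total valley prev : Int),
    runLoop rest total valley prev = total + (prev - valley) + diffSum prev rest := by
  induction rest with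
  | nil => intro total valley prev; simp [runLoop, diffSum]
  | cons price xs ih =>
    intro total valley prev
    by_cases h : price < prev
    · rw [show runLoop (price :: xs) total valley prev
          = runLoop xs (total + (prev - valley)) price price from by simp [runLoop, h], ih]
      have hng : ¬ price > prev := by omega
      simp only [diffSum, if_neg hng]
      ring
    · rw [show runLoop (price :: xs) total valley prev
          = runLoop xs total valley price from by simp [runLoop, h], ih]
      by_cases h2 : price > prev
      · simp only [diffSum, if_pos h2]
        ring
      · have : price = prev := by omega
        subst this
        simp only [diffSum, if_neg h2]
        ring

lemma foldA (tail : List Int) : ∀ (L : List Int) (k : Nat) (acc prev : Int),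
    1 ≤ k → L.drop k = tail → PySem.List.pyGet? L ((k : Int) - 1) = some prev →
    (PySem.List.enumerate tail (k : Int)).foldl (fun (result : Int) (ip : Int × Int) =>
      if ip.1 < 1 then result
      else match PySem.List.pyGet? L (ip.1 - 1) with
        | some p => if ip.2 > p then result + (ip.2 - p) else result
        | none => result) acc = acc + diffSum prev tail := by
  induction tail with
  | nil => intro L k acc prev _ _ _; simp [PySem.List.enumerate, diffSum]
  | cons x xs ih =>
    intro L k acc prev hk hdrop hget
    rw [PySem.List.enumerate_cons, List.foldl_cons]
    have hk1 : ¬ ((k : Int) < 1) := by omega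
    have hLk : L[k]? = some x := by
      have h0 : (L.drop k)[0]? = some x := by rw [hdrop]; rfl
      simpa using h0
    have hdrop' : L.drop (k + 1) = xs := by
      have : (L.drop k).drop 1 = xs := by rw [hdrop]; rfl
      simpa [List.drop_drop, Nat.add_comm] using this
    have hget' : PySem.List.pyGet? L (((k + 1 : Nat) : Int) - 1) = some x := by
      have he : (((k + 1 : Nat) : Int) - 1) = ((k : Nat) : Int) := by push_cast; ring
      rw [he, PySem.List.pyGet?_natCast]; exact hLk
    have hrec := ih L (k + 1) (if x > prev then acc + (x - prev) else acc) x
      (by omega) hdrop' hget'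
    have hcast : ((k : Int) + 1) = (((k + 1 : Nat)) : Int) := by push_cast; ring
    simp only [if_neg hk1, hget, hcast]
    rw [hrec]
    simp only [diffSum]
    by_cases hx : x > prev
    · simp only [if_pos hx]; ring
    · simp only [if_neg hx]; ring

lemma get_run_eq (prices : List Int) : get_run prices = get_run_alt prices := by
  cases prices with
  | nil => rfl
  | cons p rest =>
    have hget : PySem.List.pyGet? (p :: rest) (((1 : Nat) : Int) - 1) = some p := by
      have : (((1 : Nat) : Int) - 1) = 0 := by norm_num
      rw [this, PySem.List.pyGet?_zero_cons]
    have h := foldA rest (p :: rest) 1 0 p le_rfl rfl hget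
    show (PySem.List.enumerate (p :: rest) 0).foldl _ 0 = runLoop rest 0 p p
    rw [PySem.List.enumerate_cons, List.foldl_cons, runLoop_eq]
    have h01 : ((0 : Int) + 1) = ((1 : Nat) : Int) := by norm_num
    simp only [show ((0 : Int) < 1) from by norm_num, if_pos, h01]
    rw [h]
    ring

-- ===== VERDICT =====
theorem get_run_spec : Claim_equal_get_run := by
  intro prices _
  unfold Spec_get_run
  exact get_run_eq prices
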